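-- pv_equiv track=rewrite | github.com/SuyodhanJ6/DSA-LEET-CODE | Array/1909. Remove One Element to Make the Array Strictly Increasing.py | canBeIncreasing
-- ===== SOURCE A (Python) =====
-- def canBeIncreasing(nums):
--     '''
--     Method Name : canBeIncreasing
--     Description : This method find the number is greater than the previous number
--                     then number deleting and return True
--     Output      : True Or False(boolean)
--     On Failure  : None
--
--     '''
--     # Count the increasing element in the array
--     n = len(nums)
--     index = -1
--     count = 0
--     for i in range(n-1):
--         if nums[i] >= nums[i+1]:
--             index = i
--             count += 1
--
--     if count == 0:
--         return True
--     if count == 1: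
--         if index == 0 or index == n-2:
--             return True
--         if nums[index-1] < nums[index + 1] or (index+2 and nums[index] < nums[index+2]):
--             return True
--     return False
-- ===== SOURCE B (Python) =====
-- def is_increasing(arr):
--     return all(arr[k] < arr[k + 1] for k in range(len(arr) - 1))
--
--
-- def canBeIncreasing(nums):
--     if is_increasing(nums):
--         return True
--     for i in range(len(nums)):
--         if is_increasing(nums[:i] + nums[i + 1:]):
--             return True
--     return False
-- ===== Notes on version B (the rewrite author's own statement) =====
-- stated objective: simpler
-- what changed: Replaces A's single violation-counting pass with index bookkeeping and four-way case analysis by a plain brute force: check the array, else try deleting each element (via slicing) and rescan.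
import Mathlib
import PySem

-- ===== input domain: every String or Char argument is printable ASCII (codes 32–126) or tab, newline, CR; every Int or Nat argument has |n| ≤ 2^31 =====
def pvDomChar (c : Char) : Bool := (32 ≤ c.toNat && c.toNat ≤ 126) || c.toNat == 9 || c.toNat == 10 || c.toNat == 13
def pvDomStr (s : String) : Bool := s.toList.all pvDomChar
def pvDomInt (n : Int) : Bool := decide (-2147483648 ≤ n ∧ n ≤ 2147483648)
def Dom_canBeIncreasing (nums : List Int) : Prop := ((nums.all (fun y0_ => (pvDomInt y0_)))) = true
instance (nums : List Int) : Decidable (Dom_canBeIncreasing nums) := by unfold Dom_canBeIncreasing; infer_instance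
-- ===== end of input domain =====

-- B replaces A's single violation-counting pass (last-violation index + four-way case
-- analysis) by plain brute force: if not already strictly increasing, try deleting each
-- element via slicing and rescan; same return value, simpler code, no speed claim.

-- ===== PORT A =====
def canBeIncreasing (nums : List Int) : Bool :=
  let n : Int := nums.length
  let st := (PySem.List.pyRange 0 (n - 1) 1).foldl
      (fun (st : Int × Int) i =>
        if PySem.List.pyGetD nums (i + 1) 0 ≤ PySem.List.pyGetD nums i 0
        then (i, st.2 + 1) else st)
      (-1, 0)
  if st.2 = 0 then true
  else if st.2 = 1 then
    if st.1 = 0 ∨ st.1 = n - 2 then true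
    else if PySem.List.pyGetD nums (st.1 - 1) 0 < PySem.List.pyGetD nums (st.1 + 1) 0
            ∨ (st.1 + 2 ≠ 0 ∧ PySem.List.pyGetD nums st.1 0 < PySem.List.pyGetD nums (st.1 + 2) 0)
    then true
    else false
  else false

-- ===== PORT B =====
def isIncreasingB (arr : List Int) : Bool :=
  (PySem.List.pyRange 0 ((arr.length : Int) - 1) 1).all
    (fun k => decide (PySem.List.pyGetD arr k 0 < PySem.List.pyGetD arr (k + 1) 0))

def canBeIncreasing_alt (nums : List Int) : Bool :=
  if isIncreasingB nums then true
  else (PySem.List.pyRange 0 (nums.length : Int) 1).any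
    (fun i => isIncreasingB
        (PySem.List.slice nums none (some i) ++ PySem.List.slice nums (some (i + 1)) none))

-- ===== PRECONDITION & SPEC =====
def Spec_canBeIncreasing (nums : List Int) (out : Bool) : Prop := out = canBeIncreasing_alt nums
instance (nums : List Int) (out : Bool) : Decidable (Spec_canBeIncreasing nums out) := by unfold Spec_canBeIncreasing; infer_instance

-- ===== CLAIM (what is proved, stated in full; the proofs are below) =====
def Claim_equal_canBeIncreasing : Prop := ∀ (nums : List Int), Dom_canBeIncreasing nums → Spec_canBeIncreasing nums (canBeIncreasing nums)

-- ===== LEMMAS AND PROOFS =====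

/-- `l` is strictly increasing (adjacent pairs), phrased with total `getD`. -/
def IncrP (l : List Int) : Prop := ∀ k, k + 1 < l.length → l.getD k 0 < l.getD (k + 1) 0

/-- The common specification: already increasing, or one deletion makes it so. -/
def CanP (l : List Int) : Prop := IncrP l ∨ ∃ i, i < l.length ∧ IncrP (l.eraseIdx i)

/-- Positions of adjacent violations, in increasing order. -/
def badF (l : List Int) : List Nat :=
  (List.range (l.length - 1)).filter (fun k => decide (l.getD (k + 1) 0 ≤ l.getD k 0))

lemma mem_badF (l : List Int) (k : Nat) :
    k ∈ badF l ↔ k + 1 < l.length ∧ l.getD (k + 1) 0 ≤ l.getD k 0 := by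
  simp only [badF, List.mem_filter, List.mem_range, decide_eq_true_iff]
  constructor <;> rintro ⟨h1, h2⟩ <;> exact ⟨by omega, h2⟩

lemma incr_iff_badF_nil (l : List Int) : IncrP l ↔ badF l = [] := by
  constructor
  · intro h
    refine List.eq_nil_iff_forall_not_mem.mpr fun k hk => ?_
    rw [mem_badF] at hk
    exact absurd (h k hk.1) (not_lt.mpr hk.2)
  · intro h k hk
    by_contra hnot
    have hm : k ∈ badF l := (mem_badF l k).mpr ⟨hk, not_lt.mp hnot⟩
    simp [h] at hm

lemma pyGetD_cast_add (l : List Int) (k : Nat) (c : Int) (hc : 0 ≤ c) :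
    PySem.List.pyGetD l ((k : Int) + c) 0 = l.getD (k + c.toNat) 0 := by
  rw [PySem.List.pyGetD_of_nonneg l 0 (by omega)]
  congr 1; omega

lemma hrange_sub_one (n : Nat) :
    PySem.List.pyRange 0 ((n : Int) - 1) 1 = (List.range (n - 1)).map (fun k : Nat => (k : Int)) := by
  rw [PySem.List.pyRange_one]
  have h : ((n : Int) - 1 - 0).toNat = n - 1 := by omega
  rw [h]
  exact List.map_congr_left (fun k _ => by omega)

lemma hrange_nat (n : Nat) :
    PySem.List.pyRange 0 (n : Int) 1 = (List.range n).map (fun k : Nat => (k : Int)) := by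
  rw [PySem.List.pyRange_one]
  have h : ((n : Int) - 0).toNat = n := by omega
  rw [h]
  exact List.map_congr_left (fun k _ => by omega)

lemma foldA (l : List Int) (m : Nat) (a : Int × Int) :
    ((List.range m).map (fun k : Nat => (k : Int))).foldl
      (fun st i =>
        if PySem.List.pyGetD l (i + 1) 0 ≤ PySem.List.pyGetD l i 0
        then (i, st.2 + 1) else st) a
    = (((List.range m).filter (fun k => decide (l.getD (k + 1) 0 ≤ l.getD k 0))).getLast?.elim
          a.1 (fun k : Nat => (k : Int)),
       a.2 + (((List.range m).filter (fun k => decide (l.getD (k + 1) 0 ≤ l.getD k 0))).length : Int)) := by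
  induction m generalizing a with
  | zero => simp
  | succ m ih =>
    rw [List.range_succ, List.map_append, List.foldl_append, ih, List.filter_append]
    have hg1 : PySem.List.pyGetD l ((m : Int) + 1) 0 = l.getD (m + 1) 0 := by
      have := pyGetD_cast_add l m 1 (by omega); simpa using this
    have hg0 : PySem.List.pyGetD l (m : Int) 0 = l.getD m 0 := PySem.List.pyGetD_natCast l m 0
    simp only [List.map_cons, List.map_nil, List.foldl_cons, List.foldl_nil,
      List.filter_cons, List.filter_nil, hg1, hg0]
    by_cases hc : l.getD (m + 1) 0 ≤ l.getD m 0
    · rw [if_pos hc, if_pos (by simpa using hc)]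
      rw [List.getLast?_concat]
      refine Prod.ext rfl ?_
      simp only [List.length_append, List.length_cons, List.length_nil]
      push_cast
      ring
    · rw [if_neg hc, if_neg (by simpa using hc), List.append_nil]

lemma getD_eraseIdx (l : List Int) (i j : Nat) (hi : i < l.length) (h : j < l.length - 1) :
    (l.eraseIdx i).getD j 0 = if j < i then l.getD j 0 else l.getD (j + 1) 0 := by
  have hlen : (l.eraseIdx i).length = l.length - 1 := List.length_eraseIdx_of_lt hi
  rw [List.getD_eq_getElem _ _ (by omega), List.getElem_eraseIdx]
  by_cases hj : j < i
  · rw [dif_pos hj, if_pos hj, List.getD_eq_getElem _ _ (by omega)]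
  · rw [dif_neg hj, if_neg hj, List.getD_eq_getElem _ _ (by omega)]

lemma incr_eraseIdx_iff (l : List Int) (i : Nat) (hi : i < l.length) :
    IncrP (l.eraseIdx i) ↔
      ((∀ k, k + 1 < l.length → (k + 1 < i ∨ i < k) → l.getD k 0 < l.getD (k + 1) 0) ∧
       (0 < i → i + 1 < l.length → l.getD (i - 1) 0 < l.getD (i + 1) 0)) := by
  have hlen : (l.eraseIdx i).length = l.length - 1 := List.length_eraseIdx_of_lt hi
  constructor
  · intro h
    refine ⟨fun k hk hcase => ?_, fun h0 h1 => ?_⟩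
    · rcases hcase with hlt | hgt
      · have hh := h k (by omega)
        rwa [getD_eraseIdx l i k hi (by omega), getD_eraseIdx l i (k + 1) hi (by omega),
             if_pos (by omega), if_pos hlt] at hh
      · have hh := h (k - 1) (by omega)
        rw [getD_eraseIdx l i (k - 1) hi (by omega), getD_eraseIdx l i (k - 1 + 1) hi (by omega),
            if_neg (by omega), if_neg (by omega)] at hh
        have e1 : k - 1 + 1 = k := by omega
        simpa [e1] using hh
    · have hh := h (i - 1) (by omega)
      rw [getD_eraseIdx l i (i - 1) hi (by omega), getD_eraseIdx l i (i - 1 + 1) hi (by omega),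
          if_pos (by omega), if_neg (by omega)] at hh
      have e1 : i - 1 + 1 + 1 = i + 1 := by omega
      rwa [e1] at hh
  · rintro ⟨h1, h2⟩ k hk
    rw [hlen] at hk
    rw [getD_eraseIdx l i k hi (by omega), getD_eraseIdx l i (k + 1) hi (by omega)]
    by_cases hc1 : k + 1 < i
    · rw [if_pos (by omega), if_pos hc1]
      exact h1 k (by omega) (Or.inl hc1)
    · by_cases hc2 : k < i
      · rw [if_pos hc2, if_neg hc1]
        have hh := h2 (by omega) (by omega)
        have e1 : i - 1 = k := by omega
        have e2 : i + 1 = k + 1 + 1 := by omega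
        rwa [e1, e2] at hh
      · rw [if_neg hc2, if_neg (by omega)]
        exact h1 (k + 1) (by omega) (Or.inr (by omega))

lemma isIncB_iff (l : List Int) : isIncreasingB l = true ↔ IncrP l := by
  unfold isIncreasingB IncrP
  rw [hrange_sub_one, List.all_eq_true]
  constructor
  · intro h k hk
    have hmem : ((k : Int)) ∈ (List.range (l.length - 1)).map (fun k : Nat => (k : Int)) := by
      simp only [List.mem_map, List.mem_range]
      exact ⟨k, by omega, rfl⟩
    have hh := h _ hmem
    simp only [decide_eq_true_iff] at hh
    rwa [PySem.List.pyGetD_natCast, pyGetD_cast_add l k 1 (by omega)] at hh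
  · intro h x hx
    simp only [List.mem_map, List.mem_range] at hx
    obtain ⟨k, hk, rfl⟩ := hx
    simp only [decide_eq_true_iff]
    rw [PySem.List.pyGetD_natCast, pyGetD_cast_add l k 1 (by omega)]
    exact h k (by omega)

lemma slice_erase (l : List Int) (i : Nat) :
    PySem.List.slice l none (some (i : Int)) ++ PySem.List.slice l (some ((i : Int) + 1)) none
      = l.eraseIdx i := by
  rw [PySem.List.slice_to l (by omega), PySem.List.slice_from l (by omega),
      List.eraseIdx_eq_take_drop_succ]
  have e1 : ((i : Int)).toNat = i := by omega
  have e2 : ((i : Int) + 1).toNat = i + 1 := by omega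
  rw [e1, e2]

lemma alt_iff (l : List Int) : canBeIncreasing_alt l = true ↔ CanP l := by
  unfold canBeIncreasing_alt
  by_cases hinc : isIncreasingB l = true
  · rw [if_pos hinc]
    exact ⟨fun _ => Or.inl ((isIncB_iff l).mp hinc), fun _ => rfl⟩
  · rw [if_neg hinc, hrange_nat, List.any_eq_true]
    constructor
    · rintro ⟨x, hx, hsat⟩
      simp only [List.mem_map, List.mem_range] at hx
      obtain ⟨i, hi, rfl⟩ := hx
      rw [slice_erase l i, isIncB_iff] at hsat
      exact Or.inr ⟨i, hi, hsat⟩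
    · rintro (hIncr | ⟨i, hi, h⟩)
      · exact absurd ((isIncB_iff l).mpr hIncr) hinc
      · refine ⟨(i : Int), ?_, ?_⟩
        · simp only [List.mem_map, List.mem_range]
          exact ⟨i, hi, rfl⟩
        · rw [slice_erase l i]
          exact (isIncB_iff _).mpr h

lemma not_can_of_two (l : List Int) (k1 k2 : Nat) (h12 : k1 < k2)
    (hb1 : k1 ∈ badF l) (hb2 : k2 ∈ badF l) : ¬ CanP l := by
  rw [mem_badF] at hb1 hb2
  rintro (hIncr | ⟨i, hi, hinc⟩)
  · exact absurd (hIncr k1 hb1.1) (not_lt.mpr hb1.2)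
  · rw [incr_eraseIdx_iff l i hi] at hinc
    obtain ⟨h1, h2⟩ := hinc
    have hk1 : ¬ (k1 + 1 < i ∨ i < k1) := fun hc => absurd (h1 k1 hb1.1 hc) (not_lt.mpr hb1.2)
    have hk2 : ¬ (k2 + 1 < i ∨ i < k2) := fun hc => absurd (h1 k2 hb2.1 hc) (not_lt.mpr hb2.2)
    push Not at hk1 hk2
    have e2 : k2 = i := by omega
    have e1 : k1 = i - 1 := by omega
    have h0 : 0 < i := by omega
    have hm := h2 h0 (by omega)
    have b1 := hb1.2
    have b2 := hb2.2
    rw [e1] at b1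
    rw [e2] at b2
    have e3 : i - 1 + 1 = i := by omega
    rw [e3] at b1
    omega

lemma can_single_iff (l : List Int) (k : Nat) (hk : k + 1 < l.length)
    (hbad : l.getD (k + 1) 0 ≤ l.getD k 0)
    (honly : ∀ j, j + 1 < l.length → l.getD (j + 1) 0 ≤ l.getD j 0 → j = k) :
    CanP l ↔ (k = 0 ∨ k + 2 = l.length ∨
      (0 < k ∧ l.getD (k - 1) 0 < l.getD (k + 1) 0) ∨
      (k + 2 < l.length ∧ l.getD k 0 < l.getD (k + 2) 0)) := by
  constructor
  · rintro (hIncr | ⟨i, hi, hinc⟩)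
    · exact absurd (hIncr k hk) (not_lt.mpr hbad)
    · rw [incr_eraseIdx_iff l i hi] at hinc
      obtain ⟨h1, h2⟩ := hinc
      have hki : ¬ (k + 1 < i ∨ i < k) := fun hc => absurd (h1 k hk hc) (not_lt.mpr hbad)
      push Not at hki
      by_cases hik : i = k
      · subst hik
        by_cases h0 : 0 < i
        · exact Or.inr (Or.inr (Or.inl ⟨h0, h2 h0 hk⟩))
        · exact Or.inl (by omega)
      · have hik1 : i = k + 1 := by omega
        subst hik1
        by_cases hend : k + 2 < l.length
        · have hm := h2 (by omega) (by omega)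
          have e1 : k + 1 - 1 = k := by omega
          have e2 : k + 1 + 1 = k + 2 := by omega
          rw [e1, e2] at hm
          exact Or.inr (Or.inr (Or.inr ⟨hend, hm⟩))
        · exact Or.inr (Or.inl (by omega))
  · rintro (h0 | hend | ⟨hpos, hlt⟩ | ⟨hlt2, hlt⟩)
    · subst h0
      refine Or.inr ⟨0, by omega, ?_⟩
      rw [incr_eraseIdx_iff l 0 (by omega)]
      refine ⟨fun j hj hc => ?_, fun h0' _ => absurd h0' (by omega)⟩
      by_contra hnot
      have hj0 := honly j hj (not_lt.mp hnot)
      omega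
    · refine Or.inr ⟨l.length - 1, by omega, ?_⟩
      rw [incr_eraseIdx_iff l (l.length - 1) (by omega)]
      refine ⟨fun j hj hc => ?_, fun _ h1' => by omega⟩
      by_contra hnot
      have hj0 := honly j hj (not_lt.mp hnot)
      omega
    · refine Or.inr ⟨k, by omega, ?_⟩
      rw [incr_eraseIdx_iff l k (by omega)]
      refine ⟨fun j hj hc => ?_, fun _ _ => hlt⟩
      by_contra hnot
      have hj0 := honly j hj (not_lt.mp hnot)
      omega
    · refine Or.inr ⟨k + 1, by omega, ?_⟩
      rw [incr_eraseIdx_iff l (k + 1) (by omega)]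
      refine ⟨fun j hj hc => ?_, fun _ _ => ?_⟩
      · by_contra hnot
        have hj0 := honly j hj (not_lt.mp hnot)
        omega
      · have e1 : k + 1 - 1 = k := by omega
        have e2 : k + 1 + 1 = k + 2 := by omega
        rw [e1, e2]
        exact hlt

lemma a_iff (l : List Int) : canBeIncreasing l = true ↔ CanP l := by
  simp only [canBeIncreasing]
  rw [hrange_sub_one, foldA]
  have hbF : (List.range (l.length - 1)).filter (fun k => decide (l.getD (k + 1) 0 ≤ l.getD k 0))
      = badF l := rfl
  rw [hbF]
  rcases hF : badF l with - | ⟨k, rest⟩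
  · rw [if_pos (by simp)]
    refine ⟨fun _ => Or.inl ((incr_iff_badF_nil l).mpr hF), fun _ => rfl⟩
  · rcases rest with - | ⟨k2, rest2⟩
    · -- exactly one violation, at k
      have hkm : k ∈ badF l := by rw [hF]; simp
      rw [mem_badF] at hkm
      have honly : ∀ j, j + 1 < l.length → l.getD (j + 1) 0 ≤ l.getD j 0 → j = k := by
        intro j hj hb
        have hmem : j ∈ badF l := (mem_badF l j).mpr ⟨hj, hb⟩
        rw [hF] at hmem
        simpa using hmem
      rw [can_single_iff l k hkm.1 hkm.2 honly]
      rw [if_neg (by simp), if_pos (by simp)]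
      have egl : (([k].getLast?).elim ((-1 : Int), (0 : Int)).1 (fun k : Nat => (k : Int))) = (k : Int) := rfl
      rw [egl]
      by_cases hA1 : (k : Int) = 0 ∨ (k : Int) = (l.length : Int) - 2
      · rw [if_pos hA1]
        have hd : k = 0 ∨ k + 2 = l.length := by
          rcases hA1 with h | h
          · left; omega
          · right; omega
        exact ⟨fun _ => hd.imp id Or.inl, fun _ => rfl⟩
      · rw [if_neg hA1]
        push Not at hA1
        have g1 : PySem.List.pyGetD l ((k : Int) - 1) 0 = l.getD (k - 1) 0 := by
          rw [PySem.List.pyGetD_of_nonneg l 0 (by omega)]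
          congr 1
          omega
        have g2 : PySem.List.pyGetD l ((k : Int) + 1) 0 = l.getD (k + 1) 0 := by
          have := pyGetD_cast_add l k 1 (by omega)
          simpa using this
        have g3 : PySem.List.pyGetD l (k : Int) 0 = l.getD k 0 := PySem.List.pyGetD_natCast l k 0
        have g4 : PySem.List.pyGetD l ((k : Int) + 2) 0 = l.getD (k + 2) 0 := by
          have := pyGetD_cast_add l k 2 (by omega)
          simpa using this
        rw [g1, g2, g3, g4]
        constructor
        · intro ht
          by_cases hc : l.getD (k - 1) 0 < l.getD (k + 1) 0
              ∨ ((k : Int) + 2 ≠ 0 ∧ l.getD k 0 < l.getD (k + 2) 0)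
          · rcases hc with hc | ⟨-, hc⟩
            · exact Or.inr (Or.inr (Or.inl ⟨by omega, hc⟩))
            · exact Or.inr (Or.inr (Or.inr ⟨by omega, hc⟩))
          · rw [if_neg hc] at ht
            exact absurd ht (by simp)
        · rintro (h0 | hend | ⟨hp, hlt⟩ | ⟨hb, hlt⟩)
          · exact absurd h0 (by omega)
          · exact absurd hend (by omega)
          · rw [if_pos (Or.inl hlt)]
          · rw [if_pos (Or.inr ⟨by omega, hlt⟩)]
    · -- at least two violations
      have hsorted : (badF l).Pairwise (· < ·) :=
        List.Pairwise.sublist List.filter_sublist List.pairwise_lt_range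
      rw [hF, List.pairwise_cons] at hsorted
      have hk12 : k < k2 := hsorted.1 k2 (by simp)
      have hnc := not_can_of_two l k k2 hk12 (by rw [hF]; simp) (by rw [hF]; simp)
      rw [if_neg (by simp only [List.length_cons]; push_cast; omega),
          if_neg (by simp only [List.length_cons]; push_cast; omega)]
      exact ⟨fun h => absurd h (by simp), fun h => absurd h hnc⟩

-- ===== VERDICT (by name: the statement is the Claim_ definition above) =====
theorem canBeIncreasing_spec : Claim_equal_canBeIncreasing := by
  intro nums _
  unfold Spec_canBeIncreasing
  have h := (a_iff nums).trans (alt_iff nums).symm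
  cases hA : canBeIncreasing nums <;> cases hB : canBeIncreasing_alt nums <;> simp_all
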